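-- pv_equiv track=rewrite | github.com/ernieIzde8ski/ratbot | utils/functions.py | strip_str
-- ===== SOURCE A (Python) =====
-- def strip_str(text: str) -> str:
--     """Strips away much of a string
--
--     In order, this function removes non-ASCII, removes
--     characters duplicated more than twice, lowercases
--     the string, and removes whitespace.
--     """
--     text = "".join([c for c in text if ord(c) <= 128])
--     resp = "  "
--     for i in text:
--         if i == resp[-1] and i == resp[-2]:
--             continue
--         else:
--             resp += i
--     resp = "".join(resp.lower().split())
--     return resp
-- ===== SOURCE B (Python) =====
-- def strip_str(text: str) -> str:
--     """Strips away much of a string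
--
--     Same behaviour as the original: keep ASCII (ord <= 128), collapse any run
--     of an identical character to at most two (case-sensitively, before
--     lowercasing), lowercase, and drop whitespace.  Re-implemented as three
--     comprehension passes: the collapse compares each character with the two
--     PRECEDING INPUT characters instead of growing a string accumulator seeded
--     with two spaces.
--     """
--     t = [c for c in text if ord(c) <= 128]
--     collapsed = "".join(c for i, c in enumerate(t) if i < 2 or not (c == t[i - 1] == t[i - 2]))
--     return "".join(c for c in collapsed.lower() if not c.isspace())
-- ===== Notes on version B (the rewrite author's own statement) =====
-- stated objective: idiomatic
-- what changed: Replaced the grow-a-string accumulator seeded with two spaces (look-back at resp[-1]/resp[-2]) by comprehension passes that collapse runs by comparing each character with the two preceding input characters, then lowercase and drop whitespace charwise instead of via lower().split()/join.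
import Mathlib
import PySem

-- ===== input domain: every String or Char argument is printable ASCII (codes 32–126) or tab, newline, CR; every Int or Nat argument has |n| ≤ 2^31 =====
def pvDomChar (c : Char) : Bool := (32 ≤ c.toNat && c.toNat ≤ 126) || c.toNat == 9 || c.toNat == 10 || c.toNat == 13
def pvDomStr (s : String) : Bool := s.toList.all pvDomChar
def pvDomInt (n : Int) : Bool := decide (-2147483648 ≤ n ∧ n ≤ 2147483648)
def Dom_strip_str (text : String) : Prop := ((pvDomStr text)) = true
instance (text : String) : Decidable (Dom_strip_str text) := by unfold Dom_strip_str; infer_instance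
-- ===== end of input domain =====

-- B replaces A's two-space-seeded accumulator loop by comprehension passes that
-- collapse runs via the two preceding input characters (idiomatic decomposition, same result).


-- ===== PORT A =====
def strip_str (text : String) : String :=
  let t : List Char := text.toList.filter (fun c => decide (c.toNat ≤ 128))
  let resp : List Char := t.foldl (fun resp i =>
      if some i == PySem.List.pyGet? resp (-1) && some i == PySem.List.pyGet? resp (-2)
      then resp
      else resp ++ [i]) [' ', ' ']
  String.ofList (PySem.Chars.join [] (PySem.Chars.split₀ (PySem.Chars.lower resp)))

-- ===== PORT B =====
def strip_str_alt (text : String) : String :=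
  let t : List Char := text.toList.filter (fun c => decide (c.toNat ≤ 128))
  let collapsed : List Char :=
    ((PySem.List.enumerate t).filter (fun p =>
        decide (p.1 < 2) ||
          !(some p.2 == PySem.List.pyGet? t (p.1 - 1)
            && PySem.List.pyGet? t (p.1 - 1) == PySem.List.pyGet? t (p.1 - 2)))).map (·.2)
  String.ofList ((PySem.Chars.lower collapsed).filter (fun c => !PySem.Chars.isspace c))

-- ===== PRECONDITION & SPEC =====
def Spec_strip_str (text : String) (out : String) : Prop := out = strip_str_alt text
instance (text : String) (out : String) : Decidable (Spec_strip_str text out) := by unfold Spec_strip_str; infer_instance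

-- ===== CLAIM (what is proved, stated in full; the proofs are below) =====
def Claim_equal_strip_str : Prop := ∀ (text : String), Dom_strip_str text → Spec_strip_str text (strip_str text)

-- ===== LEMMAS AND PROOFS =====

-- run-collapse with the previous two characters as explicit state
def pvCol (a b : Char) : List Char → List Char
  | [] => []
  | c :: cs => (if c = b ∧ c = a then [] else [c]) ++ pvCol b c cs

-- the last two elements of r ++ [a, b], as Python's resp[-1], resp[-2]
lemma pv_get_last2 (r : List Char) (a b : Char) :
    PySem.List.pyGet? (r ++ [a, b]) (-1) = some b ∧
    PySem.List.pyGet? (r ++ [a, b]) (-2) = some a := by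
  constructor <;> simp [PySem.List.pyGet?, PySem.List.pyIdx?]

-- A's loop appends pvCol of the remaining input
lemma pv_foldA (l : List Char) : ∀ (r : List Char) (a b : Char),
    l.foldl (fun resp i =>
      if some i == PySem.List.pyGet? resp (-1) && some i == PySem.List.pyGet? resp (-2)
      then resp else resp ++ [i]) (r ++ [a, b]) = r ++ [a, b] ++ pvCol a b l := by
  induction l with
  | nil => intro r a b; simp [pvCol]
  | cons c cs ih =>
    intro r a b
    obtain ⟨h1, h2⟩ := pv_get_last2 r a b
    rw [List.foldl_cons, h1, h2]
    by_cases hc : c = b ∧ c = a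
    · obtain ⟨hb, ha⟩ := hc
      subst hb; subst ha
      simpa [pvCol] using ih r c c
    · have hcond : (some c == some b && some c == some a) = false := by
        rcases not_and_or.mp hc with h | h <;> simp [h]
      rw [hcond]
      simp only [Bool.false_eq_true, if_false]
      have : (r ++ [a, b]) ++ [c] = (r ++ [a]) ++ [b, c] := by simp
      rw [this, ih (r ++ [a]) b c]
      simp [pvCol, hc]

-- flattening split₀.go gives the non-whitespace characters
lemma pv_go_flatten (cs : List Char) : ∀ (cur : List Char) (acc : List (List Char)),
    (PySem.Chars.split₀.go cs cur acc).flatten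
      = acc.reverse.flatten ++ cur.reverse ++ cs.filter (fun c => !PySem.Chars.isspace c) := by
  induction cs with
  | nil =>
    intro cur acc
    by_cases hcur : cur = []
    · simp [PySem.Chars.split₀.go, hcur]
    · simp [PySem.Chars.split₀.go, List.isEmpty_eq_false_iff.mpr hcur]
  | cons c rest ih =>
    intro cur acc
    by_cases hs : PySem.Chars.isspace c = true
    · by_cases hcur : cur = []
      · simp [PySem.Chars.split₀.go, hs, hcur, ih]
      · simp [PySem.Chars.split₀.go, hs, List.isEmpty_eq_false_iff.mpr hcur, ih]
    · simp [PySem.Chars.split₀.go, hs, ih]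

-- "".join(s.split()) removes exactly the whitespace
lemma pv_join_split (cs : List Char) :
    PySem.Chars.join [] (PySem.Chars.split₀ cs) = cs.filter (fun c => !PySem.Chars.isspace c) := by
  have hflat : ∀ parts : List (List Char), PySem.Chars.join [] parts = parts.flatten := by
    intro parts
    induction parts with
    | nil => simp [PySem.Chars.join, List.intercalate]
    | cons p ps ih =>
      cases ps with
      | nil => simp [PySem.Chars.join, List.intercalate]
      | cons q qs =>
        rw [PySem.Chars.join_cons_cons, ih]
        simp
  rw [PySem.Chars.split₀, hflat, pv_go_flatten]
  simp

-- B's filtered enumeration computes pvCol of the remaining input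
lemma pv_enum (t r : List Char) : ∀ (k : Nat) (a b : Char),
    2 ≤ k → t.drop k = r →
    PySem.List.pyGet? t ((k : Int) - 2) = some a →
    PySem.List.pyGet? t ((k : Int) - 1) = some b →
    ((PySem.List.enumerate r (k : Int)).filter (fun p =>
        decide (p.1 < 2) ||
          !(some p.2 == PySem.List.pyGet? t (p.1 - 1)
            && PySem.List.pyGet? t (p.1 - 1) == PySem.List.pyGet? t (p.1 - 2)))).map (·.2)
      = pvCol a b r := by
  induction r with
  | nil => intro k a b hk hd h2 h1; simp [PySem.List.enumerate, pvCol]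
  | cons c cs ih =>
    intro k a b hk hd h2 h1
    have hklt : ¬ ((k : Int) < 2) := by omega
    have hlen : k < t.length := by
      have := congrArg List.length hd
      simp [List.length_drop] at this
      omega
    have hck : PySem.List.pyGet? t (k : Int) = some c := by
      rw [PySem.List.pyGet?_natCast]
      have h0 : (t.drop k)[0]? = some c := by rw [hd]; rfl
      rw [List.getElem?_drop] at h0
      simpa using h0
    have hdrop : t.drop (k + 1) = cs := by
      have : t.drop (k + 1) = (t.drop k).drop 1 := by
        rw [List.drop_drop]
      rw [this, hd]; rfl
    have hrec := ih (k + 1) b c (by omega)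
      hdrop
      (by have e : ((k + 1 : Nat) : Int) - 2 = (k : Int) - 1 := by push_cast; ring
          rw [e]; exact h1)
      (by have e : ((k + 1 : Nat) : Int) - 1 = (k : Int) := by push_cast; ring
          rw [e]; exact hck)
    rw [PySem.List.enumerate]
    simp only [List.filter_cons]
    have ecast : (k : Int) + 1 = ((k + 1 : Nat) : Int) := by push_cast; ring
    by_cases hcb : c = b ∧ b = a
    · obtain ⟨hb, hba⟩ := hcb
      subst hb; subst hba
      have hcond : (decide ((k : Int) < 2) ||
          !(some c == PySem.List.pyGet? t ((k : Int) - 1)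
            && PySem.List.pyGet? t ((k : Int) - 1) == PySem.List.pyGet? t ((k : Int) - 2))) = false := by
        simp [hklt, h1, h2]
      rw [hcond]
      simp only [Bool.false_eq_true, if_false]
      rw [ecast, hrec]
      simp [pvCol]
    · have hcond : (decide ((k : Int) < 2) ||
          !(some c == PySem.List.pyGet? t ((k : Int) - 1)
            && PySem.List.pyGet? t ((k : Int) - 1) == PySem.List.pyGet? t ((k : Int) - 2))) = true := by
        rcases not_and_or.mp hcb with h | h <;> simp [hklt, h1, h2, h]
      rw [hcond]
      simp only [if_true, List.map_cons]
      rw [ecast, hrec]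
      have hne : ¬ (c = b ∧ c = a) := fun ⟨u, v⟩ => hcb ⟨u, u.symm.trans v⟩
      simp [pvCol, hne]

-- ===== VERDICT (by name: the statement is the Claim_ definition above) =====
theorem strip_str_spec : Claim_equal_strip_str := by
  intro text _
  unfold Spec_strip_str strip_str strip_str_alt
  simp only []
  generalize (text.toList.filter (fun c => decide (c.toNat ≤ 128))) = t
  have hl : PySem.Chars.lowerChar ' ' = ' ' := by decide
  have hs : PySem.Chars.isspace ' ' = true := by decide
  have hfold := pv_foldA t [] ' ' ' '
  simp only [List.nil_append] at hfold
  rw [hfold, pv_join_split]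
  congr 1
  match t with
  | [] => simp [PySem.List.enumerate, pvCol, PySem.Chars.lower, hl, hs]
  | [x] =>
    by_cases hx : x = ' '
    · subst hx; simp [PySem.List.enumerate, pvCol, PySem.Chars.lower, hl, hs]
    · simp [PySem.List.enumerate, pvCol, PySem.Chars.lower, hl, hs, hx]
  | x :: y :: t2 =>
    have henum := pv_enum (x :: y :: t2) t2 2 x y (by omega) (by simp)
      (by rw [show ((2 : Nat) : Int) - 2 = ((0 : Nat) : Int) by norm_num,
              PySem.List.pyGet?_natCast]; simp)
      (by rw [show ((2 : Nat) : Int) - 1 = ((1 : Nat) : Int) by norm_num,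
              PySem.List.pyGet?_natCast]; simp)
    rw [PySem.List.enumerate, PySem.List.enumerate]
    simp only [List.filter_cons]
    rw [show ((0 : Int) + 1 + 1) = ((2 : Nat) : Int) by norm_num]
    simp only [show (decide ((0 : Int) < 2)) = true by decide,
               show (decide ((0 : Int) + 1 < 2)) = true by decide,
               Bool.true_or, if_true, List.map_cons]
    rw [henum]
    by_cases hx : x = ' '
    · subst hx
      by_cases hy : y = ' '
      · subst hy; simp [pvCol, PySem.Chars.lower, hl, hs]
      · simp [pvCol, PySem.Chars.lower, hl, hs, hy]
    · have h2 : ¬ (y = x ∧ y = ' ') := by rintro ⟨h, h'⟩; exact hx (h ▸ h')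
      simp [pvCol, PySem.Chars.lower, hl, hs, hx, h2]
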